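-- pv_equiv track=rewrite | github.com/nnkennard/coref_survey | decision_tree/logreg.py | flatten_parse_spans
-- ===== SOURCE A (Python) =====
-- def flatten_parse_spans(parse_spans, token_sentences):
--   overall_parse_span_map = {}
--   token_count = 0
--   for sentence, sentence_parse_spans in zip(token_sentences, parse_spans):
--     for start, end, label in sentence_parse_spans:
--       overall_span = token_count + start, token_count + end
--       assert overall_span not in overall_parse_span_map
--       overall_parse_span_map[overall_span] = label.replace("*", "")
--     token_count += len(sentence)
--
--   return overall_parse_span_map
-- ===== SOURCE B (Python) =====
-- def flatten_parse_spans(parse_spans, token_sentences):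
--   # Recursive decomposition: flatten the suffix with offsets relative to itself,
--   # then shift the whole tail result by the first sentence's length; no running
--   # counter and no offsets table. Dict built at the end with the same
--   # assert-before-insert, in the same order.
--   def rec(spans, sents):
--     if not spans or not sents:
--       return []
--     shift = len(sents[0])
--     head = [((s, e), lab.replace("*", "")) for s, e, lab in spans[0]]
--     tail = [((s + shift, e + shift), lab) for (s, e), lab in rec(spans[1:], sents[1:])]
--     return head + tail
--   result = {}
--   for key, lab in rec(parse_spans, token_sentences):
--     assert key not in result
--     result[key] = lab
--   return result
-- ===== Notes on version B (the rewrite author's own statement) =====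
-- stated objective: alternative
-- what changed: B flattens recursively on the sentence structure: it flattens the suffix with spans relative to that suffix and then shifts the entire tail result by the first sentence's length, instead of A's iterative nested loop threading a running token counter; the dict is built afterwards from the entry list.
import Mathlib
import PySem

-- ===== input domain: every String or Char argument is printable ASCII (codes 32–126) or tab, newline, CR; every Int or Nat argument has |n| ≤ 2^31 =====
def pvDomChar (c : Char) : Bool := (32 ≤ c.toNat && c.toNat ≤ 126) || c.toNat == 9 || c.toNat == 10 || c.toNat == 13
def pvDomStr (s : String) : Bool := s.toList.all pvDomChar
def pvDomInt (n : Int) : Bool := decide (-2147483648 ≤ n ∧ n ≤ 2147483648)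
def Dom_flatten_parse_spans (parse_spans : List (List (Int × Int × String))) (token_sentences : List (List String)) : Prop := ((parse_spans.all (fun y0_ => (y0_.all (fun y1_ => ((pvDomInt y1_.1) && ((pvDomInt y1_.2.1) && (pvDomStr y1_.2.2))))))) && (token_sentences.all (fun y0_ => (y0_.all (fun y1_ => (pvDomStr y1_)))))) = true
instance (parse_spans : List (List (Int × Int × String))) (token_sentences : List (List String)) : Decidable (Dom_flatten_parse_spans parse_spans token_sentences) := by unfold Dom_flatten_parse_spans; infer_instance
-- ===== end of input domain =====

-- B flattens recursively (suffix flattened relative to itself, then the whole tail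
-- shifted by the head sentence's length) instead of A's iterative running-counter
-- loop; equal results on Pre_ (inputs without duplicate global spans).


-- ===== PORT A =====
-- A builds a dict keyed by the global span, asserting the key is fresh before each
-- insertion; under Pre_ the assert always passes and dict insertion is plain append.
def flatten_parse_spans (parse_spans : List (List (Int × Int × String))) (token_sentences : List (List String)) : List (Int × Int × String) :=
  ((List.zip token_sentences parse_spans).foldl
    (fun (st : List (Int × Int × String) × Int) sp =>
      (sp.2.foldl (fun m t => m ++ [(st.2 + t.1, st.2 + t.2.1, PySem.Str.replace t.2.2 "*" "")]) st.1,
       st.2 + (sp.1.length : Int)))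
    ([], 0)).1

-- ===== PORT B =====
-- B's recursive helper: flatten the tail relative to itself, shift it by |first sentence|.
def pvRecB : List (List (Int × Int × String)) → List (List String) → List ((Int × Int) × String)
  | sp :: spp, s :: ss =>
      let shift : Int := (s.length : Int)
      let head := sp.map (fun t => ((t.1, t.2.1), PySem.Str.replace t.2.2 "*" ""))
      let tail := (pvRecB spp ss).map (fun p => ((p.1.1 + shift, p.1.2 + shift), p.2))
      head ++ tail
  | _, _ => []

-- the final dict-building loop; under Pre_ every key is fresh, so insertion is append
def flatten_parse_spans_alt (parse_spans : List (List (Int × Int × String))) (token_sentences : List (List String)) : List (Int × Int × String) :=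
  (pvRecB parse_spans token_sentences).foldl
    (fun m p => m ++ [(p.1.1, p.1.2, p.2)]) []

-- ===== PRECONDITION & SPEC =====
-- the global keys produced by pairing each (truncated) sentence's spans with its base offset
def pvKeysAux : List (List (Int × Int × String)) → List (List String) → Int → List (Int × Int)
  | p :: pp, s :: ss, c => p.map (fun t => (c + t.1, c + t.2.1)) ++ pvKeysAux pp ss (c + (s.length : Int))
  | _, _, _ => []

-- Pre_ excludes exactly the inputs where A's assert fires (duplicate global span):
-- there A raises AssertionError and returns nothing (B raises too).
def Pre_flatten_parse_spans (parse_spans : List (List (Int × Int × String))) (token_sentences : List (List String)) : Prop :=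
  (pvKeysAux parse_spans token_sentences 0).Nodup
instance (parse_spans : List (List (Int × Int × String))) (token_sentences : List (List String)) : Decidable (Pre_flatten_parse_spans parse_spans token_sentences) := by unfold Pre_flatten_parse_spans; infer_instance

def pvWitness_flatten_parse_spans : (List (List (Int × Int × String))) × List (List String) :=
  ([[(0, 1, "NP*"), (1, 2, "VP")], [(0, 0, "*S*")]], [["a", "b"], ["c"]])

def Spec_flatten_parse_spans (parse_spans : List (List (Int × Int × String))) (token_sentences : List (List String)) (out : List (Int × Int × String)) : Prop := out = flatten_parse_spans_alt parse_spans token_sentences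
instance (parse_spans : List (List (Int × Int × String))) (token_sentences : List (List String)) (out : List (Int × Int × String)) : Decidable (Spec_flatten_parse_spans parse_spans token_sentences out) := by unfold Spec_flatten_parse_spans; infer_instance

-- ===== CLAIM (what is proved, stated in full; the proofs are below) =====
def Claim_equal_flatten_parse_spans : Prop := ∀ (parse_spans : List (List (Int × Int × String))) (token_sentences : List (List String)), Dom_flatten_parse_spans parse_spans token_sentences → Pre_flatten_parse_spans parse_spans token_sentences → Spec_flatten_parse_spans parse_spans token_sentences (flatten_parse_spans parse_spans token_sentences)

-- ===== LEMMAS AND PROOFS =====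

-- common reference: the flattened entry list with base offset c (zip truncation)
def pvGen : List (List (Int × Int × String)) → List (List String) → Int → List (Int × Int × String)
  | p :: pp, s :: ss, c =>
      p.map (fun t => (c + t.1, c + t.2.1, PySem.Str.replace t.2.2 "*" "")) ++ pvGen pp ss (c + (s.length : Int))
  | _, _, _ => []

theorem pv_foldl_append_map {α β : Type} (f : α → β) :
    ∀ (l : List α) (m : List β), l.foldl (fun m t => m ++ [f t]) m = m ++ l.map f := by
  intro l
  induction l with
  | nil => simp
  | cons x xs ih => intro m; simp [List.foldl, ih]

theorem pvA_eq_gen :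
    ∀ (ts : List (List String)) (ps : List (List (Int × Int × String))) (m : List (Int × Int × String)) (c : Int),
      ((List.zip ts ps).foldl
        (fun (st : List (Int × Int × String) × Int) sp =>
          (sp.2.foldl (fun m t => m ++ [(st.2 + t.1, st.2 + t.2.1, PySem.Str.replace t.2.2 "*" "")]) st.1,
           st.2 + (sp.1.length : Int)))
        (m, c)).1 = m ++ pvGen ps ts c := by
  intro ts
  induction ts with
  | nil => intro ps m c; simp [pvGen]
  | cons s ss ih =>
    intro ps m c
    cases ps with
    | nil => simp [pvGen]
    | cons p pp =>
      simp only [List.zip_cons_cons, List.foldl_cons, pvGen]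
      rw [pv_foldl_append_map, ih, List.append_assoc]

-- shifting B's recursive result by c and flattening the pair gives the reference list
theorem pvB_eq_gen :
    ∀ (ps : List (List (Int × Int × String))) (ts : List (List String)) (c : Int),
      (pvRecB ps ts).map (fun p => (p.1.1 + c, p.1.2 + c, p.2)) = pvGen ps ts c := by
  intro ps
  induction ps with
  | nil => intro ts c; cases ts <;> simp [pvRecB, pvGen]
  | cons p pp ih =>
    intro ts c
    cases ts with
    | nil => simp [pvRecB, pvGen]
    | cons s ss =>
      simp only [pvRecB, pvGen, List.map_append, List.map_map]
      congr 1
      · simp [Function.comp, Int.add_comm]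
      · rw [← ih ss (c + (s.length : Int))]
        apply List.map_congr_left
        intro q _
        simp only [Function.comp, Prod.mk.injEq]
        exact ⟨by ring, by ring, trivial⟩

-- ===== VERDICT (by name: the statement is the Claim_ definition above) =====
theorem flatten_parse_spans_spec : Claim_equal_flatten_parse_spans := by
  intro ps ts _ _
  unfold Spec_flatten_parse_spans flatten_parse_spans flatten_parse_spans_alt
  rw [pvA_eq_gen, List.nil_append, pv_foldl_append_map, List.nil_append]
  have h := pvB_eq_gen ps ts 0
  simp only [Int.add_zero] at h
  rw [h]
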